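-- pv_equiv track=rewrite | github.com/AlixLv/kata_newsletter_cassidoo | monarchs/main.py | sort_monarchs
-- ===== SOURCE A (Python) =====
-- def sort_monarchs(monarchs:list[str])->list[str]:
--     if len(monarchs) <= 1:
--         return monarchs
--
--     if not isinstance(monarchs, list):
--         raise TypeError("You must enter an input of type list")
--
--     for monarch in monarchs:
--         if not isinstance(monarch, str):
--             raise TypeError("You must enter a list with string only")
--
--     pivot = monarchs[len(monarchs) // 2]
--     left = [monarch for monarch in monarchs if monarch < pivot]
--     middle = [monarch for monarch in monarchs if monarch == pivot]
--     right = [monarch for monarch in monarchs if monarch > pivot]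
--
--     return sort_monarchs(left) + middle + sort_monarchs(right)
-- ===== SOURCE B (Python) =====
-- def sort_monarchs(monarchs: list[str]) -> list[str]:
--     if len(monarchs) <= 1:
--         return monarchs
--
--     if not isinstance(monarchs, list):
--         raise TypeError("You must enter an input of type list")
--
--     for monarch in monarchs:
--         if not isinstance(monarch, str):
--             raise TypeError("You must enter a list with string only")
--
--     result = []
--     for monarch in monarchs:
--         i = 0
--         while i < len(result) and result[i] < monarch:
--             i += 1
--         result.insert(i, monarch)
--     return result
-- ===== Notes on version B (the rewrite author's own statement) =====
-- stated objective: alternative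
-- what changed: Replaces the recursive three-way-partition quicksort with an iterative insertion sort that grows a sorted result list in place (same guards kept).
import Mathlib
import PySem

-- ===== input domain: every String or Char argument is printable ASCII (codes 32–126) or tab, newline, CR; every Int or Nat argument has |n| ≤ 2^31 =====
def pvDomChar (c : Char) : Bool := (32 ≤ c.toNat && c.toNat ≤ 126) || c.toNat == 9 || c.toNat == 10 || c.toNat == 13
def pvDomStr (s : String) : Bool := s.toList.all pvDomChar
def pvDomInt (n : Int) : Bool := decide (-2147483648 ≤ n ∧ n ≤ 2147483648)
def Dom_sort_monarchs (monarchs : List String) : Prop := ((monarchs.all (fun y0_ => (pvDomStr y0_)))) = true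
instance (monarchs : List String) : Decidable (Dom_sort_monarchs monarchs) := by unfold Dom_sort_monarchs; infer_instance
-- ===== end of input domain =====

-- B replaces A's recursive quicksort by an iterative insertion sort (same guards); return value only, no speed claim.
-- (The Python isinstance guards are always satisfied under the List String typing, so they have no Lean counterpart.)

-- ===== PORT A =====
-- cited by the port's decreasing_by: a filter that misses a known element shrinks the list
theorem pvPivotMem (l : List String) (h : 2 ≤ l.length) :
    (PySem.List.pyGet? l ((l.length : Int) / 2)).getD "" ∈ l := by
  have hn : ((l.length : Int) / 2) = ((l.length / 2 : Nat) : Int) := by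
    push_cast [Int.natCast_div]; rfl
  rw [hn, PySem.List.pyGet?_natCast]
  have hlt : l.length / 2 < l.length := Nat.div_lt_self (by omega) (by omega)
  rw [List.getElem?_eq_getElem hlt]
  exact List.getElem_mem hlt

theorem pvFilterLtLen {α : Type} (l : List α) (p : α → Bool) (x : α) (hx : x ∈ l)
    (hpx : p x = false) :
    (List.filter (fun y : {a // a ∈ l} => p y.1) l.attach).length < l.length := by
  rw [List.filter_attach, List.length_map, List.length_attach]
  exact List.length_filter_lt_length_iff_exists.2 ⟨x, hx, by simp [hpx]⟩
def sort_monarchs (monarchs : List String) : List String :=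
  if _h : monarchs.length ≤ 1 then monarchs
  else
    -- monarchs[len(monarchs) // 2]: the index is always in range here, so getD is never the default
    let pivot := (PySem.List.pyGet? monarchs ((monarchs.length : Int) / 2)).getD ""
    let left := monarchs.filter (fun monarch => monarch < pivot)
    let middle := monarchs.filter (fun monarch => monarch == pivot)
    let right := monarchs.filter (fun monarch => pivot < monarch)
    sort_monarchs left ++ middle ++ sort_monarchs right
termination_by monarchs.length
decreasing_by
  · simp only [List.length_unattach]
    exact pvFilterLtLen monarchs
      (fun m => decide (m < (PySem.List.pyGet? monarchs ((monarchs.length : Int) / 2)).getD "")) _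
      (pvPivotMem monarchs (by omega)) (by simp)
  · simp only [List.length_unattach]
    exact pvFilterLtLen monarchs
      (fun m => decide ((PySem.List.pyGet? monarchs ((monarchs.length : Int) / 2)).getD "" < m)) _
      (pvPivotMem monarchs (by omega)) (by simp)

-- ===== PORT B =====
-- the inner while-loop "scan past smaller elements, then insert" as structural recursion
def smInsert (x : String) : List String → List String
  | [] => [x]
  | y :: ys => if y < x then y :: smInsert x ys else x :: y :: ys

def sort_monarchs_alt (monarchs : List String) : List String :=
  if monarchs.length ≤ 1 then monarchs
  else monarchs.foldl (fun result monarch => smInsert monarch result) []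

-- ===== PRECONDITION & SPEC =====
def Spec_sort_monarchs (monarchs : List String) (out : List String) : Prop := out = sort_monarchs_alt monarchs
instance (monarchs : List String) (out : List String) : Decidable (Spec_sort_monarchs monarchs out) := by unfold Spec_sort_monarchs; infer_instance

-- ===== CLAIM (what is proved, stated in full; the proofs are below) =====
def Claim_equal_sort_monarchs : Prop := ∀ (monarchs : List String), Dom_sort_monarchs monarchs → Spec_sort_monarchs monarchs (sort_monarchs monarchs)

-- ===== LEMMAS AND PROOFS =====

-- (filter < attach).unattach over attach reduces to a plain filter (used to read fun_induction goals)
theorem pvUnattachFilter {α : Type} (l : List α) (p : α → Bool) :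
    (List.filter (fun x : {a // a ∈ l} => p ↑x) l.attach).unattach = List.filter p l := by
  rw [List.filter_attach, List.unattach, List.map_map]
  exact List.attach_map_subtype_val _

-- A's three-way partition is a permutation of the list
theorem pvPartitionPerm (p : String) (l : List String) :
    (l.filter (fun m => decide (m < p)) ++ l.filter (fun m => m == p) ++
      l.filter (fun m => decide (p < m))).Perm l := by
  induction l with
  | nil => simp
  | cons x xs ih =>
    simp only [List.filter_cons]
    rcases lt_trichotomy x p with h1 | h2 | h3
    · rw [if_pos (decide_eq_true h1),
        if_neg (fun hc => (ne_of_lt h1) (eq_of_beq hc)),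
        if_neg (fun hc => lt_asymm h1 (of_decide_eq_true hc))]
      exact ih.cons x
    · subst h2
      rw [if_neg (fun hc => lt_irrefl x (of_decide_eq_true hc)),
        if_pos (beq_self_eq_true x),
        if_neg (fun hc => lt_irrefl x (of_decide_eq_true hc))]
      exact ((List.perm_middle.append_right _).trans (ih.cons x))
    · rw [if_neg (fun hc => lt_asymm h3 (of_decide_eq_true hc)),
        if_neg (fun hc => (ne_of_gt h3) (eq_of_beq hc)),
        if_pos (decide_eq_true h3)]
      exact (List.perm_middle).trans (ih.cons x)

theorem sort_monarchs_perm (l : List String) : (sort_monarchs l).Perm l := by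
  fun_induction sort_monarchs l with
  | case1 l h => exact List.Perm.refl l
  | case2 l h pv lft rgt ih1 ih2 =>
    have e1 : lft = List.filter (fun monarch => decide (monarch < pv)) l := pvUnattachFilter l (fun monarch => decide (monarch < pv))
    have e2 : rgt = List.filter (fun monarch => decide (pv < monarch)) l := pvUnattachFilter l (fun monarch => decide (pv < monarch))
    rw [e1] at ih1
    rw [e2] at ih2
    exact ((ih1.append (List.Perm.refl _)).append ih2).trans (pvPartitionPerm pv l)

theorem pvAllEqPairwise (p : String) (l : List String)
    (h : ∀ a ∈ l, a = p) : l.Pairwise (· ≤ ·) := by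
  induction l with
  | nil => exact List.Pairwise.nil
  | cons x xs ih =>
    refine List.Pairwise.cons (fun b hb => ?_) (ih fun a ha => h a (List.mem_cons_of_mem _ ha))
    rw [h x List.mem_cons_self, h b (List.mem_cons_of_mem _ hb)]

theorem sort_monarchs_sorted (l : List String) : (sort_monarchs l).Pairwise (· ≤ ·) := by
  fun_induction sort_monarchs l with
  | case1 l h =>
    match l, h with
    | [], _ => exact List.Pairwise.nil
    | [x], _ => exact List.pairwise_singleton _ _
  | case2 l h p lft rgt ih1 ih2 =>
    have e1 : lft = List.filter (fun monarch => decide (monarch < p)) l := pvUnattachFilter l (fun monarch => decide (monarch < p))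
    have e2 : rgt = List.filter (fun monarch => decide (p < monarch)) l := pvUnattachFilter l (fun monarch => decide (p < monarch))
    rw [e1] at ih1
    rw [e2] at ih2
    have hmemL : ∀ a ∈ sort_monarchs (l.filter (fun m => decide (m < p))), a < p := by
      intro a ha
      have := (sort_monarchs_perm _).mem_iff.1 ha
      simpa using (List.mem_filter.1 this).2
    have hmemR : ∀ a ∈ sort_monarchs (l.filter (fun m => decide (p < m))), p < a := by
      intro a ha
      have := (sort_monarchs_perm _).mem_iff.1 ha
      simpa using (List.mem_filter.1 this).2
    have hmemM : ∀ a ∈ l.filter (fun m => m == p), a = p := by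
      intro a ha
      simpa using (List.mem_filter.1 ha).2
    show ((sort_monarchs (l.filter (fun m => decide (m < p))) ++
        l.filter (fun m => m == p)) ++
        sort_monarchs (l.filter (fun m => decide (p < m)))).Pairwise (· ≤ ·)
    refine List.pairwise_append.2 ⟨List.pairwise_append.2 ⟨ih1, pvAllEqPairwise p _ hmemM, ?_⟩, ih2, ?_⟩
    · intro a ha b hb
      rw [hmemM b hb]
      exact le_of_lt (hmemL a ha)
    · intro a ha b hb
      rcases List.mem_append.1 ha with ha | ha
      · exact le_of_lt ((hmemL a ha).trans (hmemR b hb))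
      · rw [hmemM a ha]
        exact le_of_lt (hmemR b hb)

theorem smInsert_perm (x : String) (l : List String) : (smInsert x l).Perm (x :: l) := by
  induction l with
  | nil => exact List.Perm.refl _
  | cons y ys ih =>
    rw [smInsert]
    split
    · exact (ih.cons y).trans (List.Perm.swap x y ys)
    · exact List.Perm.refl _

theorem smInsert_sorted (x : String) (l : List String) (h : l.Pairwise (· ≤ ·)) :
    (smInsert x l).Pairwise (· ≤ ·) := by
  induction l with
  | nil => exact List.pairwise_singleton _ _
  | cons y ys ih =>
    rw [smInsert]
    split
    · rename_i hyx
      refine List.Pairwise.cons (fun b hb => ?_) (ih (List.Pairwise.of_cons h))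
      rcases List.mem_cons.1 ((smInsert_perm x ys).mem_iff.1 hb) with hb | hb
      · subst hb
        exact le_of_lt hyx
      · exact (List.pairwise_cons.1 h).1 b hb
    · rename_i hyx
      have hxy : x ≤ y := le_of_not_gt hyx
      refine List.Pairwise.cons (fun b hb => ?_) h
      rcases List.mem_cons.1 hb with hb | hb
      · exact hb ▸ hxy
      · exact hxy.trans ((List.pairwise_cons.1 h).1 b hb)

theorem pvFoldlInsertPerm (l acc : List String) :
    (l.foldl (fun result monarch => smInsert monarch result) acc).Perm (acc ++ l) := by
  induction l generalizing acc with
  | nil => simp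
  | cons x xs ih =>
    simp only [List.foldl_cons]
    exact ((ih (smInsert x acc)).trans ((smInsert_perm x acc).append_right xs)).trans
      List.perm_middle.symm

theorem pvFoldlInsertSorted (l acc : List String) (h : acc.Pairwise (· ≤ ·)) :
    (l.foldl (fun result monarch => smInsert monarch result) acc).Pairwise (· ≤ ·) := by
  induction l generalizing acc with
  | nil => exact h
  | cons x xs ih => exact ih (smInsert x acc) (smInsert_sorted x acc h)

theorem sort_monarchs_alt_perm (l : List String) : (sort_monarchs_alt l).Perm l := by
  rw [sort_monarchs_alt]
  split
  · exact List.Perm.refl l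
  · simpa using pvFoldlInsertPerm l []

theorem sort_monarchs_alt_sorted (l : List String) : (sort_monarchs_alt l).Pairwise (· ≤ ·) := by
  rw [sort_monarchs_alt]
  split
  · rename_i h
    match l, h with
    | [], _ => exact List.Pairwise.nil
    | [x], _ => exact List.pairwise_singleton _ _
  · exact pvFoldlInsertSorted l [] List.Pairwise.nil

-- ===== VERDICT (by name: the statement is the Claim_ definition above) =====
theorem sort_monarchs_spec : Claim_equal_sort_monarchs := by
  intro monarchs _
  unfold Spec_sort_monarchs
  exact List.Perm.eq_of_pairwise
    (fun _ _ _ _ hab hba => le_antisymm hab hba)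
    (sort_monarchs_sorted monarchs) (sort_monarchs_alt_sorted monarchs)
    ((sort_monarchs_perm monarchs).trans (sort_monarchs_alt_perm monarchs).symm)
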